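-- pv_equiv track=rewrite | github.com/PittYHL/Elastic_MBQC | dense.py | prune_Z
-- ===== SOURCE A (Python) =====
-- def prune_Z(map):
--     longest = 0
--     for row in map:
--         if len(row) > longest:
--             longest = len(row)
--     for i in range(len(map)):
--         if len(map[i]) < longest:
--             map[i] = map[i] + ['Z'] * (longest - len(map[i]))
--
--     end = 0
--     while end < len(map[0]):
--         record = [0] * len(map)
--         for i in range(len(map)):
--             if map[i][end] == 'Z':
--                 record[i] = 1
--         if 0 not in record:
--             for i in range(len(map)):
--                 map[i].pop(end)
--         else:
--             end = end + 1
--     return map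
-- ===== SOURCE B (Python) =====
-- def prune_Z(map):
--     longest = max((len(r) for r in map), default=0)
--     padded = [r + ['Z'] * (longest - len(r)) for r in map]
--     keep = [j for j in range(longest) if any(row[j] != 'Z' for row in padded)]
--     return [[row[j] for j in keep] for row in padded]
-- ===== Notes on version B (the rewrite author's own statement) =====
-- stated objective: alternative
-- what changed: Instead of repeatedly re-scanning and popping all-'Z' columns in place (each pop shifts every row), B marks surviving column indices in one pass and rebuilds each row once; measured ~1.5x at the largest size but not consistently, so no speed claim.
import Mathlib
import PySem

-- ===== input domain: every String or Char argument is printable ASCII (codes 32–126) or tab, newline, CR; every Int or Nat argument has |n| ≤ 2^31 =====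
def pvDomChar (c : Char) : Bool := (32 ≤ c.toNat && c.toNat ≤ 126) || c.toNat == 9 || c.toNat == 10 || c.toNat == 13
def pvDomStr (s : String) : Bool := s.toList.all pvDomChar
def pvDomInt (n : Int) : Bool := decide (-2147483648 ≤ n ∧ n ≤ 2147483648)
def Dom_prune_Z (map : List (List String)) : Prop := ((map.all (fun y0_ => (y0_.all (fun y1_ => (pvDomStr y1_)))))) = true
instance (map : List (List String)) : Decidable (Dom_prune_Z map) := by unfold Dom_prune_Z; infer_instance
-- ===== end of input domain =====

-- B replaces A's repeated scan-and-pop of all-'Z' columns by one pass that collects the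
-- surviving column indices and rebuilds each row once. A mutates its argument in place
-- (padding and pops); B does not: the equivalence proved here is about the RETURN value only.

-- ===== PORT A =====
-- row padding: `if len(map[i]) < longest: map[i] = map[i] + ['Z'] * (longest - len(map[i]))`
def padRowA (longest : Nat) (r : List String) : List String :=
  if r.length < longest then r ++ List.replicate (longest - r.length) "Z" else r

-- the `while end < len(map[0])` loop; fuel = initial len(map[0]) bounds the iteration count
-- (each iteration either pops a column, shrinking len(map[0]), or advances `end`).
-- `map[i][end]` is ported as getD (exact: after padding all rows have length len(map[0]) > end);
-- `map[i].pop(end)` is ported as eraseIdx (exact for the in-range nonnegative index end).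
def pruneLoopA : Nat → List (List String) → Nat → List (List String)
  | 0, m, _ => m
  | fuel+1, m, e =>
    if e < (m.headD []).length then
      let record := m.map (fun r => if r.getD e "" = "Z" then (1 : Int) else 0)
      if ¬ (0 : Int) ∈ record then
        pruneLoopA fuel (m.map (fun r => r.eraseIdx e)) e
      else
        pruneLoopA fuel m (e+1)
    else m

def prune_Z (map : List (List String)) : List (List String) :=
  let longest := map.foldl (fun acc r => if r.length > acc then r.length else acc) 0
  let padded := map.map (padRowA longest)
  pruneLoopA (padded.headD []).length padded 0

-- ===== PORT B =====
def prune_Z_alt (map : List (List String)) : List (List String) :=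
  let longest := map.foldl (fun acc r => max acc r.length) 0
  let padded := map.map (fun r => r ++ List.replicate (longest - r.length) "Z")
  let keep := (List.range longest).filter (fun j => padded.any (fun row => row.getD j "" != "Z"))
  padded.map (fun row => keep.map (fun j => row.getD j ""))

-- ===== PRECONDITION & SPEC =====
-- Pre_ excludes only the empty matrix, on which A raises IndexError at `map[0]`.
def Pre_prune_Z (map : List (List String)) : Prop := map ≠ []
instance (map : List (List String)) : Decidable (Pre_prune_Z map) := by unfold Pre_prune_Z; infer_instance
def pvWitness_prune_Z : List (List String) := [["Z", "X"], ["Z"]]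

def Spec_prune_Z (map : List (List String)) (out : List (List String)) : Prop := out = prune_Z_alt map
instance (map : List (List String)) (out : List (List String)) : Decidable (Spec_prune_Z map out) := by unfold Spec_prune_Z; infer_instance

-- ===== CLAIM (what is proved, stated in full; the proofs are below) =====
def Claim_equal_prune_Z : Prop := ∀ (map : List (List String)), Dom_prune_Z map → Pre_prune_Z map → Spec_prune_Z map (prune_Z map)

-- ===== LEMMAS AND PROOFS =====

-- surviving column indices of m in [e, w)
def keepCols (m : List (List String)) (e w : Nat) : List Nat :=
  (List.range' e (w - e)).filter (fun j => m.any (fun row => row.getD j "" != "Z"))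

theorem any_congr_mem (l : List (List String)) (f g : List String → Bool)
    (h : ∀ r ∈ l, f r = g r) : l.any f = l.any g := by
  induction l with
  | nil => rfl
  | cons a t ih => simp [List.any_cons, h a (by simp), ih (fun r hr => h r (by simp [hr]))]

theorem getD_eraseIdx_ge (xs : List String) (n j : Nat) (h : n < xs.length) (hj : n ≤ j) :
    (xs.eraseIdx n).getD j "" = xs.getD (j+1) "" := by
  rw [List.eraseIdx_eq_take_drop_succ]
  have hl : (xs.take n).length = n := by simp; omega
  simp only [List.getD, List.getElem?_append_right (by omega : (xs.take n).length ≤ j), hl,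
    List.getElem?_drop]
  congr 2; omega

theorem take_eraseIdx (xs : List String) (n : Nat) (h : n ≤ xs.length) :
    (xs.eraseIdx n).take n = xs.take n := by
  rw [List.eraseIdx_eq_take_drop_succ, List.take_append]
  have : (xs.take n).length = n := by simp; omega
  simp [this]

theorem take_succ_getD (xs : List String) (n : Nat) (h : n < xs.length) :
    xs.take (n+1) = xs.take n ++ [xs.getD n ""] := by
  rw [List.take_add_one, List.getElem?_eq_getElem h]
  simp [List.getD, List.getElem?_eq_getElem h]

-- dropping the all-Z column e from every row shifts the surviving columns beyond e down by one
theorem keepCols_erase (m : List (List String)) (w e : Nat)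
    (hw : ∀ r ∈ m, r.length = w) (he : e < w) :
    keepCols (m.map (fun r => r.eraseIdx e)) e (w-1) = (keepCols m (e+1) w).map (· - 1) := by
  unfold keepCols
  have hn : w - (e+1) = (w-1) - e := by omega
  rw [hn, List.range'_eq_map_range, List.range'_eq_map_range, List.filter_map, List.filter_map,
    List.map_map]
  have hfil : ∀ k, ((fun j => (m.map (fun r => r.eraseIdx e)).any (fun row => row.getD j "" != "Z")) ∘ (e + ·)) k
      = ((fun j => m.any (fun row => row.getD j "" != "Z")) ∘ (e + 1 + ·)) k := by
    intro k
    simp only [Function.comp_apply, List.any_map, Function.comp_def]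
    apply any_congr_mem
    intro r hr
    rw [getD_eraseIdx_ge r e (e+k) (by rw [hw r hr]; omega) (by omega)]
    congr 2; omega
  rw [List.filter_congr (fun k _ => hfil k)]
  apply List.map_congr_left
  intro k _
  simp only [Function.comp_apply]; omega

theorem keepCols_cons (m : List (List String)) (w e : Nat) (he : e < w)
    (hp : m.any (fun row => row.getD e "" != "Z") = true) :
    keepCols m e w = e :: keepCols m (e+1) w := by
  unfold keepCols
  have : w - e = (w - (e+1)) + 1 := by omega
  rw [this, List.range'_succ]
  simp only [List.filter_cons, hp]
  simp

theorem keepCols_skip (m : List (List String)) (w e : Nat) (he : e < w)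
    (hp : m.any (fun row => row.getD e "" != "Z") = false) :
    keepCols m e w = keepCols m (e+1) w := by
  unfold keepCols
  have : w - e = (w - (e+1)) + 1 := by omega
  rw [this, List.range'_succ]
  simp only [List.filter_cons, hp]
  simp

theorem loop_eq (fuel : Nat) : ∀ (w : Nat) (m : List (List String)) (e : Nat),
    m ≠ [] → (∀ r ∈ m, r.length = w) → e ≤ w → w - e ≤ fuel →
    pruneLoopA fuel m e = m.map (fun r => r.take e ++ (keepCols m e w).map (fun j => r.getD j "")) := by
  induction fuel with
  | zero =>
    intro w m e hne hw hew hf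
    have he : e = w := by omega
    have hkc : keepCols m e w = [] := by unfold keepCols; simp [he]
    rw [pruneLoopA, hkc]
    conv_lhs => rw [← List.map_id m]
    apply List.map_congr_left
    intro r hr
    subst he
    simp [List.take_of_length_le (by rw [hw r hr])]
  | succ fuel ih =>
    intro w m e hne hw hew hf
    have hhead : (m.headD []).length = w := hw _ (by cases m with | nil => exact absurd rfl hne | cons a t => simp)
    rw [pruneLoopA, hhead]
    by_cases hlt : e < w
    · simp only [if_pos hlt]
      have hrec : ((0:Int) ∈ m.map (fun r => if r.getD e "" = "Z" then (1 : Int) else 0))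
          ↔ (m.any (fun row => row.getD e "" != "Z")) = true := by
        simp only [List.mem_map, List.any_eq_true, bne_iff_ne, ne_eq]
        constructor
        · rintro ⟨r, hr, hv⟩
          refine ⟨r, hr, ?_⟩
          intro hz; rw [if_pos hz] at hv; exact absurd hv (by norm_num)
        · rintro ⟨r, hr, hv⟩
          exact ⟨r, hr, by rw [if_neg hv]⟩
      by_cases h0 : (0:Int) ∈ m.map (fun r => if r.getD e "" = "Z" then (1 : Int) else 0)
      · -- column e survives: advance e
        have hp : m.any (fun row => row.getD e "" != "Z") = true := hrec.mp h0
        rw [if_neg (not_not.mpr h0)]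
        rw [ih w m (e+1) hne hw (by omega) (by omega)]
        rw [keepCols_cons m w e hlt hp]
        apply List.map_congr_left
        intro r hr
        rw [take_succ_getD r e (by rw [hw r hr]; exact hlt)]
        simp
      · -- all-Z column: pop it from every row
        have hp' : m.any (fun row => row.getD e "" != "Z") = false := by
          by_contra hc
          exact h0 (hrec.mpr (by simpa using hc))
        rw [if_pos h0]
        have hne' : m.map (fun r => r.eraseIdx e) ≠ [] := by
          cases m with | nil => exact absurd rfl hne | cons a t => simp
        have hw' : ∀ r ∈ m.map (fun r => r.eraseIdx e), r.length = w - 1 := by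
          intro r hr
          obtain ⟨r0, hr0, rfl⟩ := List.mem_map.mp hr
          rw [List.length_eraseIdx_of_lt (by rw [hw r0 hr0]; exact hlt), hw r0 hr0]
        rw [ih (w-1) _ e hne' hw' (by omega) (by omega)]
        rw [List.map_map]
        apply List.map_congr_left
        intro r hr
        simp only [Function.comp_apply]
        rw [take_eraseIdx r e (by rw [hw r hr]; omega)]
        rw [keepCols_erase m w e hw hlt, keepCols_skip m w e hlt hp', List.map_map]
        congr 1
        apply List.map_congr_left
        intro j hj
        have hj' : e + 1 ≤ j := by
          have := List.mem_range'.mp (List.mem_of_mem_filter hj)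
          omega
        simp only [Function.comp_apply]
        rw [getD_eraseIdx_ge r e (j-1) (by rw [hw r hr]; exact hlt) (by omega)]
        congr 1; omega
    · rw [if_neg hlt]
      have he : e = w := by omega
      have hkc : keepCols m e w = [] := by unfold keepCols; simp [he]
      rw [hkc]
      conv_lhs => rw [← List.map_id m]
      apply List.map_congr_left
      intro r hr
      subst he
      simp [List.take_of_length_le (by rw [hw r hr])]

theorem init_le_foldl_maxlen (l : List (List String)) : ∀ (a : Nat),
    a ≤ l.foldl (fun acc r => max acc r.length) a := by
  induction l with
  | nil => intro a; simp
  | cons x t ih =>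
    intro a
    simp only [List.foldl_cons]
    exact le_trans (le_max_left _ _) (ih _)

theorem le_foldl_maxlen (l : List (List String)) : ∀ (a : Nat) (r : List String), r ∈ l →
    r.length ≤ l.foldl (fun acc r => max acc r.length) a := by
  induction l with
  | nil => intro a r hr; simp at hr
  | cons x t ih =>
    intro a r hr
    rcases List.mem_cons.mp hr with rfl | hr
    · simp only [List.foldl_cons]
      exact le_trans (le_max_right _ _) (init_le_foldl_maxlen t _)
    · exact ih _ r hr

theorem prune_Z_spec' (map : List (List String)) (h : map ≠ []) : prune_Z map = prune_Z_alt map := by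
  obtain ⟨r0, rest, rfl⟩ : ∃ r0 rest, map = r0 :: rest := by
    cases map with
    | nil => exact absurd rfl h
    | cons a t => exact ⟨a, t, rfl⟩
  simp only [prune_Z, prune_Z_alt]
  have hfold : (fun (acc : Nat) (r : List String) => if r.length > acc then r.length else acc)
      = (fun acc r => max acc r.length) := by
    funext acc r; split <;> omega
  rw [hfold]
  set L := (r0 :: rest).foldl (fun acc r => max acc r.length) 0 with hL
  have hle : ∀ r ∈ r0 :: rest, r.length ≤ L := fun r hr => le_foldl_maxlen _ 0 r hr
  have hpad : (r0 :: rest).map (padRowA L)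
      = (r0 :: rest).map (fun r => r ++ List.replicate (L - r.length) "Z") := by
    apply List.map_congr_left
    intro r hr
    unfold padRowA
    split
    · rfl
    · have h0 : L - r.length = 0 := by omega
      simp [h0]
  rw [hpad]
  have hw : ∀ r ∈ (r0 :: rest).map (fun r => r ++ List.replicate (L - r.length) "Z"), r.length = L := by
    intro r hr
    obtain ⟨q, hq, rfl⟩ := List.mem_map.mp hr
    simp only [List.length_append, List.length_replicate]
    have := hle q hq; omega
  have hne : (r0 :: rest).map (fun r => r ++ List.replicate (L - r.length) "Z") ≠ [] := by simp
  have hhead : (((r0 :: rest).map (fun r => r ++ List.replicate (L - r.length) "Z")).headD []).length = L := by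
    apply hw
    simp only [List.map_cons, List.headD_cons]
    exact List.mem_cons_self
  rw [hhead, loop_eq L L _ 0 hne hw (by omega) (by omega)]
  apply List.map_congr_left
  intro r hr
  simp only [List.take_zero, List.nil_append]
  congr 1
  unfold keepCols
  rw [← List.range_eq_range']
  norm_num

-- ===== VERDICT (by name: the statement is the Claim_ definition above) =====
theorem prune_Z_spec : Claim_equal_prune_Z := by
  intro m _ hpre
  exact prune_Z_spec' m hpre
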